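-- pv_equiv track=rewrite | github.com/Junha7777/Online-Judge | Python/백준/Bronze/11117. Letter Cookies/Letter Cookies.py | can_spell_word
-- ===== SOURCE A (Python) =====
-- def can_spell_word(cookie_letters, word):
--     from collections import Counter
--     cookie_count = Counter(cookie_letters)
--     word_count = Counter(word)
--     for letter, count in word_count.items():
--         if cookie_count[letter] < count:
--             return "NO"
--     return "YES"
-- ===== SOURCE B (Python) =====
-- def can_spell_word(cookie_letters, word):
--     pool = list(cookie_letters)
--     for letter in word:
--         if letter in pool:
--             pool.remove(letter)
--         else:
--             return "NO"
--     return "YES"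
-- ===== Notes on version B (the rewrite author's own statement) =====
-- stated objective: alternative
-- what changed: Instead of comparing two prebuilt letter-frequency Counters, B consumes a mutable pool of cookie letters, removing one matching cookie per letter of the word and failing at the first letter with no cookie left.
import Mathlib
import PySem

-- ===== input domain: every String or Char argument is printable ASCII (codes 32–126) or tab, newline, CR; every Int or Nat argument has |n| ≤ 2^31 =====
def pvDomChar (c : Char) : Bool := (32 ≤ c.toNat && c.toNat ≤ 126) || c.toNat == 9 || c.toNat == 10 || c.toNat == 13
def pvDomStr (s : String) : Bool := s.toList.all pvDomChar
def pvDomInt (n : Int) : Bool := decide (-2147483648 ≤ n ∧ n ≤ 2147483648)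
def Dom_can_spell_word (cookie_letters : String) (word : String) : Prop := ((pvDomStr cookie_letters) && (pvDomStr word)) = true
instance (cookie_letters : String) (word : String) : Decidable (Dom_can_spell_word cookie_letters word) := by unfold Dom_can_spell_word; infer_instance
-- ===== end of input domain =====

-- B replaces the two Counter frequency tables with a mutable pool of cookie letters
-- consumed one removal per word letter (alternative algorithm, same result).

-- ===== PORT A =====
-- the for-loop over word_count.items() with early return
def canSpellLoopA (cookieCount : PySem.Dict Char Int) : List (Char × Int) → String
  | [] => "YES"
  | (letter, count) :: rest =>
      if cookieCount.getD letter 0 < count then "NO" else canSpellLoopA cookieCount rest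

def can_spell_word (cookie_letters : String) (word : String) : String :=
  canSpellLoopA (PySem.Dict.counter cookie_letters.toList)
    (PySem.Dict.counter word.toList).items

-- ===== PORT B =====
-- the for-loop over word, consuming `pool` (list.remove = erase first occurrence)
def canSpellLoopB : List Char → List Char → String
  | _, [] => "YES"
  | pool, c :: rest => if c ∈ pool then canSpellLoopB (pool.erase c) rest else "NO"

def can_spell_word_alt (cookie_letters : String) (word : String) : String :=
  canSpellLoopB cookie_letters.toList word.toList

-- ===== PRECONDITION & SPEC =====
def Spec_can_spell_word (cookie_letters : String) (word : String) (out : String) : Prop := out = can_spell_word_alt cookie_letters word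
instance (cookie_letters : String) (word : String) (out : String) : Decidable (Spec_can_spell_word cookie_letters word out) := by unfold Spec_can_spell_word; infer_instance

-- ===== CLAIM (what is proved, stated in full; the proofs are below) =====
def Claim_equal_can_spell_word : Prop := ∀ (cookie_letters : String) (word : String), Dom_can_spell_word cookie_letters word → Spec_can_spell_word cookie_letters word (can_spell_word cookie_letters word)

-- ===== LEMMAS AND PROOFS =====

-- B's loop succeeds iff the word (remaining suffix) fits in the pool as a multiset
theorem loopB_eq_if (w : List Char) : ∀ (pool : List Char),
    canSpellLoopB pool w =
      if ∀ c ∈ w, w.count c ≤ pool.count c then "YES" else "NO" := by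
  induction w with
  | nil => intro pool; simp [canSpellLoopB]
  | cons c rest ih =>
      intro pool
      by_cases hc : c ∈ pool
      · rw [canSpellLoopB, if_pos hc, ih]
        have hcnt : 1 ≤ pool.count c := List.one_le_count_iff.mpr hc
        by_cases h : ∀ d ∈ c :: rest, (c :: rest).count d ≤ pool.count d
        · rw [if_pos h, if_pos]
          intro d hd
          have := h d (List.mem_cons_of_mem c hd)
          rw [List.count_erase]
          simp only [List.count_cons] at this
          by_cases hdc : d = c <;> simp [hdc] at * <;> omega
        · rw [if_neg h, if_neg]
          intro hall
          apply h
          intro d hd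
          rcases List.mem_cons.mp hd with hdc | hdr
          · subst hdc
            by_cases hdr : d ∈ rest
            · have := hall d hdr
              rw [List.count_erase_self] at this
              simp only [List.count_cons_self]
              omega
            · simp [List.count_cons_self, List.count_eq_zero_of_not_mem hdr]
              omega
          · have h1 := hall d hdr
            rw [List.count_erase] at h1
            simp only [List.count_cons]
            by_cases hdc : d = c
            · subst hdc
              simp only [beq_self_eq_true, if_true] at h1 ⊢
              omega
            · simp only [beq_iff_eq, Ne.symm hdc, if_false] at h1 ⊢
              omega
      · rw [canSpellLoopB, if_neg hc, if_neg]
        intro hall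
        have := hall c List.mem_cons_self
        simp [List.count_cons_self, List.count_eq_zero_of_not_mem hc] at this

-- A's loop over (distinct letter, count) pairs checks the same multiset condition
theorem loopA_eq_if (cookie word : List Char) (S : List Char) :
    canSpellLoopA (PySem.Dict.counter cookie)
        (S.map (fun k => (k, (word.count k : Int)))) =
      if ∀ c ∈ S, word.count c ≤ cookie.count c then "YES" else "NO" := by
  induction S with
  | nil => simp [canSpellLoopA]
  | cons c rest ih =>
      simp only [List.map_cons, canSpellLoopA, PySem.Dict.getD_counter, ih]
      by_cases h : (cookie.count c : Int) < word.count c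
      · rw [if_pos h, if_neg]
        intro hall
        have := hall c List.mem_cons_self
        exact absurd h (by exact_mod_cast not_lt.mpr this)
      · rw [if_neg h]
        have hc : word.count c ≤ cookie.count c := by exact_mod_cast not_lt.mp h
        by_cases hall : ∀ d ∈ rest, word.count d ≤ cookie.count d
        · rw [if_pos hall, if_pos]
          intro d hd
          rcases List.mem_cons.mp hd with rfl | hdr
          · exact hc
          · exact hall d hdr
        · rw [if_neg hall, if_neg]
          exact fun H => hall fun d hd => H d (List.mem_cons_of_mem c hd)

-- ===== VERDICT (by name: the statement is the Claim_ definition above) =====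
theorem can_spell_word_spec : Claim_equal_can_spell_word := by
  intro cookie word _
  unfold Spec_can_spell_word can_spell_word can_spell_word_alt
  rw [PySem.Dict.items_counter, loopA_eq_if, loopB_eq_if]
  by_cases h : ∀ c ∈ word.toList, word.toList.count c ≤ cookie.toList.count c
  · rw [if_pos h, if_pos]
    intro c hc
    exact h c ((PySem.Set.mem_ofList _ _).mp hc)
  · rw [if_neg h, if_neg]
    exact fun H => h fun c hc => H c ((PySem.Set.mem_ofList _ _).mpr hc)
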